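-- pv_equiv track=rewrite | github.com/kandidat-highlights/model | model/util/helper.py | label_vector
-- ===== SOURCE A (Python) =====
-- def label_vector(users, dic, max_users):
--     """ Turns an array of some users into an array
--     with ones on those users indicies """
--     vector = [0] * max_users
--     for user in users:
--         if user in dic:
--             vector[dic[user]] = 1
--         else:
--             # If unkown user, set user UNK = 1
--             vector[0] = 1
--     return vector
-- ===== SOURCE B (Python) =====
-- def label_vector(users, dic, max_users):
--     """ Turns an array of some users into an array
--     with ones on those users indicies """
--     hits = {dic[user] if user in dic else 0 for user in users}
--     return [1 if i in hits else 0 for i in range(max_users)]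
-- ===== Notes on version B (the rewrite author's own statement) =====
-- stated objective: alternative
-- what changed: A scatters writes into a preallocated mutable vector driven by the users loop; B first collects the set of indices to mark (dic[user], or 0 for unknown users) and then builds the result in one positional comprehension over range(max_users).
-- outside the precondition, e.g. on label_vector(['u'], {'u': -1}, 3): A returns [0, 0, 1], B returns [0, 0, 0]; on label_vector(['u'], {'u': 5}, 3): A raises IndexError, B returns [0, 0, 0]
import Mathlib
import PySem

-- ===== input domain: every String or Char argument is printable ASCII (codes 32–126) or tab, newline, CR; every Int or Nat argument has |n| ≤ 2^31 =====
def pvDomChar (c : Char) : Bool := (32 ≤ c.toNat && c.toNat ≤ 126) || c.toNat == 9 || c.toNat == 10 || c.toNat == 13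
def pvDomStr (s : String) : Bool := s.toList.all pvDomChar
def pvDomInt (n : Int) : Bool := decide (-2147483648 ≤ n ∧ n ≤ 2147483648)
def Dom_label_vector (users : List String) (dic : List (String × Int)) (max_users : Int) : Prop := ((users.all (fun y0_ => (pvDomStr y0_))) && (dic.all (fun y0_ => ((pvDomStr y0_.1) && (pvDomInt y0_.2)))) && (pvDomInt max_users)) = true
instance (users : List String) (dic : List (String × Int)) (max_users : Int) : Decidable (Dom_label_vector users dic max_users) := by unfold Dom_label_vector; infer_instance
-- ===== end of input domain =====

-- B replaces A's user-driven scatter of writes into a mutable vector by first collecting the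
-- set of indices to light up and then building the result in one positional pass over
-- range(max_users) (objective: alternative decomposition, same asymptotic cost).

-- ===== PORT A =====
def label_vector (users : List String) (dic : List (String × Int)) (max_users : Int) : List Int :=
  let vector := PySem.List.pyRepeat [(0 : Int)] max_users
  users.foldl (fun vector user =>
    match (PySem.Dict.mk dic).get? user with
    | some idx => PySem.List.pySetD vector idx 1   -- vector[dic[user]] = 1 (Pre_ keeps the index in range)
    | none     => PySem.List.pySetD vector 0 1)    -- vector[0] = 1
    vector

-- ===== PORT B =====
def label_vector_alt (users : List String) (dic : List (String × Int)) (max_users : Int) : List Int :=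
  let hits : PySem.Set Int :=
    PySem.Set.ofList (users.map (fun u =>
      match (PySem.Dict.mk dic).get? u with
      | some v => v
      | none   => 0))
  (PySem.List.pyRange 0 max_users 1).map (fun i => if hits.contains i then 1 else 0)

-- ===== PRECONDITION & SPEC =====
-- Pre_ restricts dic's looked-up values to the natural domain of indicator indices,
-- 0 ≤ dic[user] < max_users (and max_users ≥ 1 when an unknown user forces vector[0] = 1):
-- outside it A either raises IndexError or, for negative in-range values, silently marks a
-- slot at the end of the vector by Python's negative-index wraparound — an accident of A's
-- write-based implementation on inputs outside the function's purpose of user→index maps.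
def Pre_label_vector (users : List String) (dic : List (String × Int)) (max_users : Int) : Prop :=
  (users.all (fun u =>
    match (PySem.Dict.mk dic).get? u with
    | some v => decide (0 ≤ v ∧ v < max_users)
    | none   => decide (1 ≤ max_users))) = true
instance (users : List String) (dic : List (String × Int)) (max_users : Int) : Decidable (Pre_label_vector users dic max_users) := by unfold Pre_label_vector; infer_instance
def pvWitness_label_vector : List String × (List (String × Int)) × Int := (["alice", "bob"], [("alice", 1)], 3)

def Spec_label_vector (users : List String) (dic : List (String × Int)) (max_users : Int) (out : List Int) : Prop := out = label_vector_alt users dic max_users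
instance (users : List String) (dic : List (String × Int)) (max_users : Int) (out : List Int) : Decidable (Spec_label_vector users dic max_users out) := by unfold Spec_label_vector; infer_instance

-- ===== CLAIM (what is proved, stated in full; the proofs are below) =====
def Claim_equal_label_vector : Prop := ∀ (users : List String) (dic : List (String × Int)) (max_users : Int), Dom_label_vector users dic max_users → Pre_label_vector users dic max_users → Spec_label_vector users dic max_users (label_vector users dic max_users)

-- ===== LEMMAS AND PROOFS =====

-- the index each user lights up (known user: its index; unknown user: 0)
def pvHit (dic : List (String × Int)) (u : String) : Int :=
  match (PySem.Dict.mk dic).get? u with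
  | some v => v
  | none   => 0

lemma pvStep_eq (dic : List (String × Int)) (vector : List Int) (user : String) :
    (match (PySem.Dict.mk dic).get? user with
     | some idx => PySem.List.pySetD vector idx 1
     | none     => PySem.List.pySetD vector 0 1) = PySem.List.pySetD vector (pvHit dic user) 1 := by
  unfold pvHit
  cases h : (PySem.Dict.mk dic).get? user <;> simp

lemma pvFoldl_invariant (dic : List (String × Int)) (users : List String) (vector : List Int)
    (h : ∀ u ∈ users, 0 ≤ pvHit dic u ∧ pvHit dic u < (vector.length : Int)) :
    (users.foldl (fun (vector : List Int) (user : String) =>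
      match (PySem.Dict.mk dic).get? user with
      | some idx => PySem.List.pySetD vector idx 1
      | none     => PySem.List.pySetD vector 0 1) vector).length = vector.length ∧
    ∀ i : Int, 0 ≤ i →
      PySem.List.pyGetD (users.foldl (fun (vector : List Int) (user : String) =>
        match (PySem.Dict.mk dic).get? user with
        | some idx => PySem.List.pySetD vector idx 1
        | none     => PySem.List.pySetD vector 0 1) vector) i (0 : Int)
      = if i ∈ users.map (pvHit dic) then 1 else PySem.List.pyGetD vector i (0 : Int) := by
  induction users generalizing vector with
  | nil => simp
  | cons u us ih =>
    have hu := h u (by simp)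
    have hlen : (PySem.List.pySetD vector (pvHit dic u) 1).length = vector.length :=
      PySem.List.length_pySetD vector (pvHit dic u) 1
    have hrest : ∀ v ∈ us, 0 ≤ pvHit dic v ∧ pvHit dic v < ((PySem.List.pySetD vector (pvHit dic u) 1).length : Int) := by
      intro v hv; rw [hlen]; exact h v (by simp [hv])
    obtain ⟨ihlen, ihget⟩ := ih (PySem.List.pySetD vector (pvHit dic u) 1) hrest
    simp only [pvStep_eq] at ihlen ihget ⊢
    constructor
    · simp only [List.foldl_cons]
      rw [ihlen, hlen]
    · intro i hi
      simp only [List.foldl_cons]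
      rw [ihget i hi]
      have hset : PySem.List.pyGetD (PySem.List.pySetD vector (pvHit dic u) 1) i 0
          = if i = pvHit dic u then 1 else PySem.List.pyGetD vector i 0 := by
        have h1 : pvHit dic u = ((pvHit dic u).toNat : Int) := by omega
        have h2 : i = ((i.toNat : Nat) : Int) := by omega
        rw [h1, h2, PySem.List.pyGetD_pySetD_natCast vector (pvHit dic u).toNat i.toNat 1 0 (by omega)]
        simp only [Nat.cast_inj]
      rw [hset]
      by_cases hmem : i ∈ us.map (pvHit dic)
      · simp [hmem]
      · by_cases heq : i = pvHit dic u <;> simp [hmem, heq]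

lemma pvPre_hits (users : List String) (dic : List (String × Int)) (max_users : Int)
    (hpre : Pre_label_vector users dic max_users) :
    ∀ u ∈ users, 0 ≤ pvHit dic u ∧ pvHit dic u < max_users := by
  unfold Pre_label_vector at hpre
  rw [List.all_eq_true] at hpre
  intro u hu
  have := hpre u hu
  unfold pvHit
  cases h : (PySem.Dict.mk dic).get? u
  · rw [h] at this
    simp only [decide_eq_true_eq] at this
    simp only []
    omega
  · rw [h] at this
    simp only [decide_eq_true_eq] at this
    simp only []
    omega

-- ===== VERDICT (by name: the statement is the Claim_ definition above) =====
theorem label_vector_spec : Claim_equal_label_vector := by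
  intro users dic max_users _hdom hpre
  simp only [Spec_label_vector, label_vector, label_vector_alt]
  have hhits := pvPre_hits users dic max_users hpre
  have hlen0 : (PySem.List.pyRepeat [(0 : Int)] max_users).length = max_users.toNat := by
    rw [PySem.List.pyRepeat_singleton]; simp
  obtain ⟨hlen, hget⟩ := pvFoldl_invariant dic users (PySem.List.pyRepeat [(0 : Int)] max_users)
    (by intro u hu; rw [hlen0]
        have := hhits u hu
        omega)
  apply List.ext_getElem
  · rw [hlen, hlen0]
    simp [PySem.List.length_pyRange_one]
  · intro k hk1 hk2
    have hkL : k < max_users.toNat := by rw [hlen, hlen0] at hk1; exact hk1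
    have hA := hget (k : Int) (Int.natCast_nonneg k)
    simp only [PySem.List.pyGetD_natCast] at hA
    have hinit : (PySem.List.pyRepeat [(0 : Int)] max_users).getD k 0 = 0 := by
      rw [PySem.List.pyRepeat_singleton]
      rw [List.getD_eq_getElem _ _ (by simpa using hkL)]
      simp
    rw [hinit] at hA
    -- B side
    rw [List.getElem_map, PySem.List.getElem_pyRange_one]
    have hfun : (fun u => match (PySem.Dict.mk dic).get? u with
        | some v => v | none => (0 : Int)) = pvHit dic := rfl
    rw [hfun]
    -- A side
    rw [← List.getD_eq_getElem _ (0 : Int) hk1, hA]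
    by_cases hmem : ((k : Nat) : Int) ∈ users.map (pvHit dic)
    · simp [hmem, PySem.Set.contains, PySem.Set.mem_ofList]
    · simp [hmem, PySem.Set.contains, PySem.Set.mem_ofList]
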